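-- pv_equiv track=rewrite | github.com/XiangyuG/FlexTbl | iptable_kub_gen/gen_impl.py | gen_symbolic_masks
-- ===== SOURCE A (Python) =====
-- def collect_nodes(prefix, depth):
--     """
--     Return all node-name suffixes for a given depth.
--     prefix: "" for root, "L", "R", "LL", ...
--     """
--     if depth == 0:
--         return [prefix]
--
--     # recursively collect left and right subtree nodes
--     return collect_nodes(prefix + "L", depth - 1) + \
--            collect_nodes(prefix + "R", depth - 1)
--
-- def gen_symbolic_masks(depth):
--     nodes = []
--     mask_names = []
--     for i in range(depth):
--         nodes += collect_nodes("0", i)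
--     if len(nodes) != 0:
--         mask_names = [f"mask{n}" for n in nodes]  # mask0, mask0L, mask0R, ...
--     return mask_names
-- ===== SOURCE B (Python) =====
-- def gen_symbolic_masks(depth):
--     nodes = []
--     cur = ["0"]
--     for _ in range(depth):
--         nodes += cur
--         cur = [n + c for n in cur for c in "LR"]
--     return ["mask" + n for n in nodes]
-- ===== Notes on version B (the rewrite author's own statement) =====
-- stated objective: simpler
-- what changed: Replaces the per-level recursive collect_nodes helper (recomputed from scratch for every level) with a single iterative frontier expansion that keeps the current level and derives the next by appending L and R, dropping the helper and the redundant empty-guard.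
import Mathlib
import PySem

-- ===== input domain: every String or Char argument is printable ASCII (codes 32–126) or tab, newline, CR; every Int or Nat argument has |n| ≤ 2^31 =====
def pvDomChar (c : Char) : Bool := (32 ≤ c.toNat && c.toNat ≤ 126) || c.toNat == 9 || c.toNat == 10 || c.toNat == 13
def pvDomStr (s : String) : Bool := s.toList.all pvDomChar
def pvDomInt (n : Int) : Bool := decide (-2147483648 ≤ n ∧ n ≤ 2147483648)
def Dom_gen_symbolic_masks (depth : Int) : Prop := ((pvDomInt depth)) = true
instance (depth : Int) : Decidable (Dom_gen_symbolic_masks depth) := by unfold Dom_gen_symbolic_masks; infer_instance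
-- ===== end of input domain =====

-- B replaces A's per-level recursive helper by a single iterative frontier expansion (simpler decomposition, same values).

-- ===== PORT A =====
-- helper collect_nodes(prefix, depth); only ever called with depth ≥ 0 (loop indices), so Nat fuel is exact
def collectNodes (pre : String) : Nat → List String
  | 0 => [pre]
  | d + 1 => collectNodes (pre ++ "L") d ++ collectNodes (pre ++ "R") d

def gen_symbolic_masks (depth : Int) : List String :=
  let nodes := (PySem.List.pyRange 0 depth 1).foldl (fun acc i => acc ++ collectNodes "0" i.toNat) []
  if nodes.length ≠ 0 then nodes.map (fun n => "mask" ++ n) else []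

-- ===== PORT B =====
def gen_symbolic_masks_alt (depth : Int) : List String :=
  let st := (PySem.List.pyRange 0 depth 1).foldl
    (fun (st : List String × List String) _ =>
      (st.1 ++ st.2, st.2.flatMap (fun n => ("LR".toList).map (fun c => n ++ String.singleton c))))
    ([], ["0"])
  st.1.map (fun n => "mask" ++ n)

-- ===== PRECONDITION & SPEC =====
def Spec_gen_symbolic_masks (depth : Int) (out : List String) : Prop := out = gen_symbolic_masks_alt depth
instance (depth : Int) (out : List String) : Decidable (Spec_gen_symbolic_masks depth out) := by unfold Spec_gen_symbolic_masks; infer_instance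

-- ===== CLAIM (what is proved, stated in full; the proofs are below) =====
def Claim_equal_gen_symbolic_masks : Prop := ∀ (depth : Int), Dom_gen_symbolic_masks depth → Spec_gen_symbolic_masks depth (gen_symbolic_masks depth)

-- ===== LEMMAS AND PROOFS =====

-- one frontier-expansion step produces the next level of collect_nodes
theorem expand_collectNodes (d : Nat) : ∀ (p : String),
    (collectNodes p d).flatMap (fun n => ("LR".toList).map (fun c => n ++ String.singleton c))
      = collectNodes p (d + 1) := by
  induction d with
  | zero => intro p; rfl
  | succ d ih =>
      intro p
      simp only [collectNodes, List.flatMap_append, ih]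

-- the two folds over List.range agree: B's state is (A's nodes so far, the next level)
theorem frontier_invariant (n : Nat) :
    (List.range n).foldl
      (fun (st : List String × List String) _ =>
        (st.1 ++ st.2, st.2.flatMap (fun n => ("LR".toList).map (fun c => n ++ String.singleton c))))
      ([], ["0"])
    = ((List.range n).foldl (fun acc k => acc ++ collectNodes "0" k) [], collectNodes "0" n) := by
  induction n with
  | zero => rfl
  | succ n ih =>
      simp only [List.range_succ, List.foldl_append, List.foldl_cons, List.foldl_nil, ih,
        expand_collectNodes]

theorem gen_symbolic_masks_eq (depth : Int) :
    gen_symbolic_masks depth = gen_symbolic_masks_alt depth := by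
  unfold gen_symbolic_masks gen_symbolic_masks_alt
  rw [PySem.List.pyRange_one]
  simp only [List.foldl_map, frontier_invariant]
  have hfold : (List.range (depth - 0).toNat).foldl
      (fun acc (k : Nat) => acc ++ collectNodes "0" ((0 : Int) + (k : Int)).toNat) []
      = (List.range (depth - 0).toNat).foldl (fun acc k => acc ++ collectNodes "0" k) [] := by
    apply PySem.List.foldl_congr_mem
    intro acc k _
    have : ((0 : Int) + (k : Int)).toNat = k := by omega
    rw [this]
  rw [hfold]
  generalize (List.range (depth - 0).toNat).foldl (fun acc k => acc ++ collectNodes "0" k) [] = ns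
  cases ns with
  | nil => simp
  | cons a t => simp

-- ===== VERDICT (by name: the statement is the Claim_ definition above) =====
theorem gen_symbolic_masks_spec : Claim_equal_gen_symbolic_masks := by
  intro depth _
  exact gen_symbolic_masks_eq depth
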